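-- pv_equiv track=rewrite | github.com/luoboask/evo-agents | skills/memory-search/compress.py | extract_summary_content
-- ===== SOURCE A (Python) =====
-- def extract_summary_content(content):
--     """从摘要文件中提取核心内容"""
--     # 跳过标题和元数据，提取正文
--     lines = content.split('\n')
--     body_lines = []
--
--     in_body = False
--     for line in lines:
--         if line.startswith('# ') or line.startswith('## '):
--             in_body = True
--             continue
--         if in_body and line.strip():
--             body_lines.append(line)
--
--     return '\n'.join(body_lines[:500])  # 限制长度
-- ===== SOURCE B (Python) =====
-- def extract_summary_content(content):
--     """从摘要文件中提取核心内容"""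
--     it = iter(content.split('\n'))
--     for line in it:
--         if line.startswith(('# ', '## ')):
--             break
--     else:
--         return ''
--     out = []
--     for line in it:
--         if len(out) == 500:
--             break
--         if line.strip() and not line.startswith(('# ', '## ')):
--             out.append(line)
--     return '\n'.join(out)
-- ===== Notes on version B (the rewrite author's own statement) =====
-- stated objective: alternative
-- what changed: Two sequential loops consuming one shared iterator replace the flag-threaded single loop: the first loop drains lines up to and including the first header (for/else returns '' if none), the second collects body lines but breaks as soon as 500 are gathered instead of collecting all and truncating at the end.
import Mathlib
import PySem

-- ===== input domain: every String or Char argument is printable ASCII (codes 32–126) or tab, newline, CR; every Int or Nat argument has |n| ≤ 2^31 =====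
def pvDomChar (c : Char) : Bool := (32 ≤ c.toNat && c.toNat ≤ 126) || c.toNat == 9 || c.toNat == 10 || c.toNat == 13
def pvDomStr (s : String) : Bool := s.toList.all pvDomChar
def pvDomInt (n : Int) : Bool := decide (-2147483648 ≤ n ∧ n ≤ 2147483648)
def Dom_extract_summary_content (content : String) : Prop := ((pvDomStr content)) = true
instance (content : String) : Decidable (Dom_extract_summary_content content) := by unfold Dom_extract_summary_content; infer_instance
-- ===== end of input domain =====

-- B consumes one shared line stream with two sequential loops (drain to first header, then collect with an early break at 500) instead of A's flag-threaded single loop; same cost, different decomposition.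


-- ===== PORT A =====
-- the flag-threaded loop of A, state = (in_body, body_lines)
def extract_summary_content_loop : List String → Bool → List String → List String
  | [], _, acc => acc
  | l :: ls, inb, acc =>
    if PySem.Str.startswith l "# " || PySem.Str.startswith l "## " then
      extract_summary_content_loop ls true acc
    else if inb && (PySem.Str.strip l != "") then
      extract_summary_content_loop ls inb (acc ++ [l])
    else
      extract_summary_content_loop ls inb acc

def extract_summary_content (content : String) : String :=
  -- split? is none only for sep = "", so getD [] is exact for sep = "\n"
  let lines := (PySem.Str.split? content "\n").getD []
  let body_lines := extract_summary_content_loop lines false []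
  PySem.Str.join "\n" (PySem.List.slice body_lines none (some 500))

-- ===== PORT B =====
def pvIsHeader (line : String) : Bool :=
  PySem.Str.startswith line "# " || PySem.Str.startswith line "## "

-- first Python loop: drain the iterator up to and including the first header; none = for/else fell through
def pvDrain : List String → Option (List String)
  | [] => none
  | l :: ls => if pvIsHeader l then some ls else pvDrain ls

-- second Python loop: collect body lines into out, breaking once len(out) == 500
def pvCollect : List String → List String → List String
  | [], out => out
  | l :: ls, out =>
    if out.length == 500 then out
    else if (PySem.Str.strip l != "") && !pvIsHeader l then pvCollect ls (out ++ [l])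
    else pvCollect ls out

def extract_summary_content_alt (content : String) : String :=
  let lines := (PySem.Str.split? content "\n").getD []
  match pvDrain lines with
  | none => ""
  | some rest => PySem.Str.join "\n" (pvCollect rest [])

-- ===== PRECONDITION & SPEC =====
def Spec_extract_summary_content (content : String) (out : String) : Prop := out = extract_summary_content_alt content
instance (content : String) (out : String) : Decidable (Spec_extract_summary_content content out) := by unfold Spec_extract_summary_content; infer_instance

-- ===== CLAIM (what is proved, stated in full; the proofs are below) =====
def Claim_equal_extract_summary_content : Prop := ∀ (content : String), Dom_extract_summary_content content → Spec_extract_summary_content content (extract_summary_content content)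

-- ===== LEMMAS AND PROOFS =====

-- once the flag is set, A's loop is a plain filter
theorem loop_true (ls : List String) (acc : List String) :
    extract_summary_content_loop ls true acc
      = acc ++ ls.filter (fun l => (PySem.Str.strip l != "") && !pvIsHeader l) := by
  induction ls generalizing acc with
  | nil => simp [extract_summary_content_loop]
  | cons l ls ih =>
    by_cases h : pvIsHeader l = true
    · have h2 : (PySem.Str.startswith l "# " || PySem.Str.startswith l "## ") = true := h
      have hp : ((PySem.Str.strip l != "") && !pvIsHeader l) = false := by rw [h]; simp
      rw [extract_summary_content_loop, if_pos h2, List.filter_cons]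
      simp only [hp, Bool.false_eq_true, if_false]
      exact ih acc
    · have h' : ¬ ((PySem.Str.startswith l "# " || PySem.Str.startswith l "## ") = true) := h
      have hh : pvIsHeader l = false := eq_false_of_ne_true h
      rw [extract_summary_content_loop, if_neg h', List.filter_cons]
      by_cases hs : (PySem.Str.strip l != "") = true
      · simp only [Bool.true_and, hs, ↓reduceIte]
        rw [ih]; simp [hh]
      · have hh2 : (PySem.Str.strip l != "") = false := eq_false_of_ne_true hs
        simp only [Bool.true_and, hh2, Bool.false_eq_true, if_false]
        exact ih acc

-- before the flag is set, A's loop result is governed by what is left after the first header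
theorem loop_false (ls : List String) :
    extract_summary_content_loop ls false []
      = match pvDrain ls with
        | none => []
        | some rest => rest.filter (fun l => (PySem.Str.strip l != "") && !pvIsHeader l) := by
  induction ls with
  | nil => simp [extract_summary_content_loop, pvDrain]
  | cons l ls ih =>
    by_cases h : pvIsHeader l = true
    · have h2 : (PySem.Str.startswith l "# " || PySem.Str.startswith l "## ") = true := h
      rw [extract_summary_content_loop, if_pos h2, pvDrain, if_pos h]
      simpa using loop_true ls []
    · have h' : ¬ ((PySem.Str.startswith l "# " || PySem.Str.startswith l "## ") = true) := h
      rw [extract_summary_content_loop, if_neg h', pvDrain, if_neg h]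
      simp only [Bool.false_and, Bool.false_eq_true, if_false]
      exact ih

-- B's second loop on an accumulator of length ≤ 500 is the capped filter
theorem collect_eq (ls : List String) (out : List String) (h : out.length ≤ 500) :
    pvCollect ls out
      = out ++ (ls.filter (fun l => (PySem.Str.strip l != "") && !pvIsHeader l)).take (500 - out.length) := by
  induction ls generalizing out with
  | nil => simp [pvCollect]
  | cons l ls ih =>
    rw [pvCollect, List.filter_cons]
    by_cases hfull : out.length = 500
    · simp [hfull]
    · have hlt : out.length < 500 := lt_of_le_of_ne h hfull
      have hne : (out.length == 500) = false := by simp [hfull]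
      rw [hne]
      simp only [Bool.false_eq_true, if_false]
      by_cases hk : ((PySem.Str.strip l != "") && !pvIsHeader l) = true
      · rw [if_pos hk, if_pos hk, ih (out ++ [l]) (by simp; omega)]
        have : 500 - out.length = (500 - (out ++ [l]).length) + 1 := by simp; omega
        rw [this, List.take_succ_cons]
        simp
      · have hk2 : ((PySem.Str.strip l != "") && !pvIsHeader l) = false := eq_false_of_ne_true hk
        rw [if_neg hk, if_neg hk]
        exact ih out h

-- ===== VERDICT (by name: the statement is the Claim_ definition above) =====
theorem extract_summary_content_spec : Claim_equal_extract_summary_content := by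
  intro content _
  unfold Spec_extract_summary_content extract_summary_content extract_summary_content_alt
  simp only [loop_false]
  cases hfi : pvDrain ((PySem.Str.split? content "\n").getD []) with
  | none => simp [PySem.Str.join, PySem.Chars.join, PySem.List.slice, List.intercalate]
  | some rest =>
    simp only
    rw [show ((500 : Int)) = ((500 : Nat) : Int) by norm_num, PySem.List.slice_to_natCast,
      collect_eq rest [] (by simp)]
    simp
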